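-- pv_equiv track=rewrite | github.com/roboalchemist/jopctl | jopctl.py | resolve_folder_id
-- ===== SOURCE A (Python) =====
-- from typing import IO, Any, Dict, Iterable, List, Optional
--
-- def resolve_folder_id(identifier: str, folders: List[Dict[str, Any]]) -> Optional[str]:
--     """Resolve folder by ID or exact title (case-insensitive)."""
--     for f in folders:
--         if f.get("id") == identifier:
--             return identifier
--     matches = [f for f in folders if f.get("title", "").lower() == identifier.lower()]
--     if len(matches) == 1:
--         return matches[0].get("id")
--     if len(matches) > 1:
--         root_matches = [f for f in matches if not f.get("parent_id")]
--         if len(root_matches) == 1: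
--             return root_matches[0].get("id")
--     return None
-- ===== SOURCE B (Python) =====
-- from typing import Any, Dict, List, Optional
--
-- def resolve_folder_id(identifier: str, folders: List[Dict[str, Any]]) -> Optional[str]:
--     """Resolve folder by ID or exact title (case-insensitive) in one traversal."""
--     target = identifier.lower()
--     title_matches: List[Dict[str, Any]] = []
--     root_matches: List[Dict[str, Any]] = []
--     for f in folders:
--         if f.get("id") == identifier:
--             return identifier
--         if f.get("title", "").lower() == target:
--             title_matches.append(f)
--             if not f.get("parent_id"):
--                 root_matches.append(f)
--     if len(title_matches) == 1:
--         return title_matches[0].get("id")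
--     if len(title_matches) > 1 and len(root_matches) == 1:
--         return root_matches[0].get("id")
--     return None
-- ===== Notes on version B (the rewrite author's own statement) =====
-- stated objective: faster
-- what changed: Replaces A's three scans (id loop, title-match comprehension, root-match filter) by a single traversal that returns on an id hit and otherwise accumulates the title matches and the root title matches in one pass.
import Mathlib
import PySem

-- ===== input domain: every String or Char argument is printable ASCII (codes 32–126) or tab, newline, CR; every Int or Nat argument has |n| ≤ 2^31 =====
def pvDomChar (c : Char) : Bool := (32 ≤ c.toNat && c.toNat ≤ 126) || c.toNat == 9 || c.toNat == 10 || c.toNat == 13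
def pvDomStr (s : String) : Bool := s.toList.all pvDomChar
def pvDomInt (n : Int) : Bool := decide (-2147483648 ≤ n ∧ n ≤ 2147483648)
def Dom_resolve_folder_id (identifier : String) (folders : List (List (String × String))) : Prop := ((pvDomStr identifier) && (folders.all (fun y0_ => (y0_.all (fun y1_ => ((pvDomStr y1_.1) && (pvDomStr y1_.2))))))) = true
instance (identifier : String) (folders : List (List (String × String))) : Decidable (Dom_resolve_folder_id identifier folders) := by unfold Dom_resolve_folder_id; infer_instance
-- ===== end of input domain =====

-- B performs one traversal instead of A's three scans; same return value, no side effects.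

-- ===== PORT A =====
-- dict.get on the association-list representation of a Python dict: first match
def pvGetKey (f : List (String × String)) (k : String) : Option String :=
  (f.find? (fun p => p.1 == k)).map (·.2)

-- dict.get with default
def pvGetKeyD (f : List (String × String)) (k dflt : String) : String :=
  (pvGetKey f k).getD dflt

-- 'for f in folders: if f.get("id") == identifier: return identifier' (True = returned)
def pvIdLoop (identifier : String) : List (List (String × String)) → Bool
  | [] => false
  | f :: rest =>
    if pvGetKey f "id" == some identifier then true else pvIdLoop identifier rest

def resolve_folder_id (identifier : String) (folders : List (List (String × String))) : Option String :=
  if pvIdLoop identifier folders then some identifier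
  else
    let tms := folders.filter
      (fun f => PySem.Str.lower (pvGetKeyD f "title" "") == PySem.Str.lower identifier)
    if tms.length == 1 then
      (PySem.List.pyGet? tms 0).bind (fun m => pvGetKey m "id")
    else if tms.length > 1 then
      let rtms := tms.filter (fun f => pvGetKeyD f "parent_id" "" == "")
      if rtms.length == 1 then
        (PySem.List.pyGet? rtms 0).bind (fun m => pvGetKey m "id")
      else none
    else none

-- ===== PORT B =====
-- single pass: early return on id hit, otherwise accumulate title tms and root title tms
def pvBLoop (identifier target : String) :
    List (List (String × String)) → List (List (String × String)) → List (List (String × String)) → Option String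
  | [], title_tms, rtms =>
    match title_tms, rtms with
    | [m], _ => pvGetKey m "id"
    | _ :: _ :: _, [r] => pvGetKey r "id"
    | _, _ => none
  | f :: rest, title_tms, rtms =>
    if pvGetKey f "id" == some identifier then some identifier
    else if PySem.Str.lower (pvGetKeyD f "title" "") == target then
      pvBLoop identifier target rest (title_tms ++ [f])
        (if pvGetKeyD f "parent_id" "" == "" then rtms ++ [f] else rtms)
    else
      pvBLoop identifier target rest title_tms rtms

def resolve_folder_id_alt (identifier : String) (folders : List (List (String × String))) : Option String :=
  pvBLoop identifier (PySem.Str.lower identifier) folders [] []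

-- ===== PRECONDITION & SPEC =====
def Spec_resolve_folder_id (identifier : String) (folders : List (List (String × String))) (out : Option String) : Prop := out = resolve_folder_id_alt identifier folders
instance (identifier : String) (folders : List (List (String × String))) (out : Option String) : Decidable (Spec_resolve_folder_id identifier folders out) := by unfold Spec_resolve_folder_id; infer_instance

-- ===== CLAIM (what is proved, stated in full; the proofs are below) =====
def Claim_equal_resolve_folder_id : Prop := ∀ (identifier : String) (folders : List (List (String × String))), Dom_resolve_folder_id identifier folders → Spec_resolve_folder_id identifier folders (resolve_folder_id identifier folders)

-- ===== LEMMAS AND PROOFS =====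

-- A's tail (after the id loop fails), parameterised by the accumulated lists
def pvFinishA (tm rm : List (List (String × String))) : Option String :=
  if tm.length == 1 then (PySem.List.pyGet? tm 0).bind (fun m => pvGetKey m "id")
  else if tm.length > 1 then
    (if rm.length == 1 then (PySem.List.pyGet? rm 0).bind (fun m => pvGetKey m "id") else none)
  else none

-- B's final match equals A's if-chain on the same two lists
theorem pvFinish_eq (tm rm : List (List (String × String))) :
    (match tm, rm with
     | [m], _ => pvGetKey m "id"
     | _ :: _ :: _, [r] => pvGetKey r "id"
     | _, _ => none) = pvFinishA tm rm := by
  match tm, rm with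
  | [], _ => simp [pvFinishA]
  | [m], rm => simp [pvFinishA, PySem.List.pyGet?, PySem.List.pyIdx?]
  | a :: b :: t, [] => simp [pvFinishA]
  | a :: b :: t, [r] => simp [pvFinishA, PySem.List.pyGet?, PySem.List.pyIdx?]
  | a :: b :: t, x :: y :: u => simp [pvFinishA]

theorem pvBLoop_invariant (identifier : String) (fs tm rm : List (List (String × String))) :
    pvBLoop identifier (PySem.Str.lower identifier) fs tm rm =
      if pvIdLoop identifier fs then some identifier
      else
        pvFinishA
          (tm ++ fs.filter (fun f => PySem.Str.lower (pvGetKeyD f "title" "") == PySem.Str.lower identifier))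
          (rm ++ (fs.filter (fun f => PySem.Str.lower (pvGetKeyD f "title" "") == PySem.Str.lower identifier)).filter
                   (fun f => pvGetKeyD f "parent_id" "" == "")) := by
  induction fs generalizing tm rm with
  | nil => simp [pvBLoop, pvIdLoop, pvFinish_eq]
  | cons f rest ih =>
    by_cases hid : pvGetKey f "id" == some identifier
    · simp [pvBLoop, pvIdLoop, hid]
    · by_cases ht : PySem.Str.lower (pvGetKeyD f "title" "") == PySem.Str.lower identifier
      · by_cases hr : pvGetKeyD f "parent_id" "" == ""
        · simp [pvBLoop, pvIdLoop, hid, ht, hr, ih, List.append_assoc]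
        · simp [pvBLoop, pvIdLoop, hid, ht, hr, ih, List.append_assoc]
      · simp [pvBLoop, pvIdLoop, hid, ht, ih]

-- ===== VERDICT (by name: the statement is the Claim_ definition above) =====
theorem resolve_folder_id_spec : Claim_equal_resolve_folder_id := by
  intro identifier folders _
  unfold Spec_resolve_folder_id resolve_folder_id resolve_folder_id_alt
  rw [pvBLoop_invariant]
  by_cases h : pvIdLoop identifier folders
  · simp [h]
  · simp [h, pvFinishA, List.filter_filter]
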